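-- pv_equiv track=rewrite | github.com/caiosba/covid-19 | covid/utils.py | rpartition
-- ===== SOURCE A (Python) =====
-- def rpartition(seq, n):
--     """
--     Partition sequence in groups of n starting from the end of sequence.
--     """
--     seq = list(seq)
--     out = []
--     while seq:
--         new = []
--         for _ in range(n):
--             if not seq:
--                 break
--             new.append(seq.pop())
--         out.append(new[::-1])
--     return out[::-1]
-- ===== SOURCE B (Python) =====
-- def rpartition(seq, n):
--     """
--     Partition sequence in groups of n starting from the end of sequence.
--     """
--     lst = list(seq)
--     L = len(lst)
--     r = L % n
--     out = [lst[:r]] if r else []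
--     out.extend(lst[i:i + n] for i in range(r, L, n))
--     return out
-- ===== Notes on version B (the rewrite author's own statement) =====
-- stated objective: simpler
-- what changed: Replaces A's pop-one-element-at-a-time-from-the-tail loop with per-group and whole-list reversals by a single forward slicing pass whose group boundaries come from len(seq) % n.
-- outside the precondition, e.g. on rpartition([], 0): A returns [], B raises ZeroDivisionError
import Mathlib
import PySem

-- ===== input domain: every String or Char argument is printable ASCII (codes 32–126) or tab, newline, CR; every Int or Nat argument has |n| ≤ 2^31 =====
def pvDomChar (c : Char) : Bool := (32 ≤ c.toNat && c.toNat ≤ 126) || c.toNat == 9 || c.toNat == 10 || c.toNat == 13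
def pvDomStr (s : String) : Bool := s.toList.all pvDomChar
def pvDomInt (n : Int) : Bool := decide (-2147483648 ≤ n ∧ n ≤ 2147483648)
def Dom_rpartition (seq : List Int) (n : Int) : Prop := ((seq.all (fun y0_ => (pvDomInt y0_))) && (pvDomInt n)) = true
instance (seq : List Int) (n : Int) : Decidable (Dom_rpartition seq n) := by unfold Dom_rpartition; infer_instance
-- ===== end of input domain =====

-- B replaces A's pop-from-the-tail loop (with per-group and final reversals) by one
-- forward slicing pass whose group boundaries come from len(seq) % n (simpler, one pass).

-- ===== PORT A =====
-- inner 'for _ in range(n): if not seq: break; new.append(seq.pop())':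
-- seq.pop() takes the last element (getLast!), leaving dropLast.
def rpartitionInner : Nat → List Int → List Int → List Int × List Int
  | 0, s, new => (new, s)
  | k + 1, s, new =>
    if s = [] then (new, s)
    else rpartitionInner k s.dropLast (new ++ [s.getLast!])

-- outer 'while seq:' loop; 'out.append(new[::-1])' is 'out ++ [p.1.reverse]', final
-- 'out[::-1]' is '.reverse'.  The fuel bounds the iteration count (each iteration pops
-- at least one element when n ≥ 1; for n ≤ 0 the Python loops forever — excluded by Pre_).
def rpartitionOuter (nn : Nat) : Nat → List Int → List (List Int) → List (List Int)
  | 0, _, out => out.reverse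
  | fuel + 1, s, out =>
    if s = [] then out.reverse
    else
      let p := rpartitionInner nn s []
      rpartitionOuter nn fuel p.2 (out ++ [p.1.reverse])

def rpartition (seq : List Int) (n : Int) : List (List Int) :=
  rpartitionOuter n.toNat (seq.length + 1) seq []

-- ===== PORT B =====
def rpartition_alt (seq : List Int) (n : Int) : List (List Int) :=
  let L : Int := seq.length
  let r : Int := PySem.Int.mod L n
  let head : List (List Int) := if r ≠ 0 then [PySem.List.slice seq none (some r)] else []
  head ++ (PySem.List.pyRange r L n).map (fun i => PySem.List.slice seq (some i) (some (i + n)))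

-- ===== PRECONDITION & SPEC =====
-- Pre_ excludes n ≤ 0: on any nonempty seq Python A never returns there (its while-loop
-- pops nothing and loops forever), and B's natural '%' raises ZeroDivisionError for n = 0;
-- the only excluded input where A returns is the degenerate ([], n ≤ 0), an accident of
-- the while-loop never starting on a group size that is invalid for every other input.
def Pre_rpartition (seq : List Int) (n : Int) : Prop := 1 ≤ n
instance (seq : List Int) (n : Int) : Decidable (Pre_rpartition seq n) := by unfold Pre_rpartition; infer_instance
def pvWitness_rpartition : List Int × Int := ([1, 2, 3, 4, 5], 2)

def Spec_rpartition (seq : List Int) (n : Int) (out : List (List Int)) : Prop := out = rpartition_alt seq n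
instance (seq : List Int) (n : Int) (out : List (List Int)) : Decidable (Spec_rpartition seq n out) := by unfold Spec_rpartition; infer_instance

-- ===== CLAIM (what is proved, stated in full; the proofs are below) =====
def Claim_equal_rpartition : Prop := ∀ (seq : List Int) (n : Int), Dom_rpartition seq n → Pre_rpartition seq n → Spec_rpartition seq n (rpartition seq n)

-- ===== LEMMAS AND PROOFS =====

theorem getLast!_concat_int (t : List Int) (a : Int) : (t ++ [a]).getLast! = a := by
  cases t <;> simp [List.getLast!]

-- The inner loop pops the last k elements (or all of them): it returns new ++ those
-- elements in pop order, together with the remaining prefix.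
theorem inner_spec (k : Nat) (s new : List Int) :
    rpartitionInner k s new = (new ++ (s.drop (s.length - k)).reverse, s.take (s.length - k)) := by
  induction k generalizing s new with
  | zero => simp [rpartitionInner]
  | succ k ih =>
    rcases eq_or_ne s [] with rfl | hs
    · simp [rpartitionInner]
    · obtain ⟨t, a, rfl⟩ : ∃ t a, s = t ++ [a] :=
        ⟨s.dropLast, s.getLast hs, (List.dropLast_append_getLast hs).symm⟩
      rw [rpartitionInner, if_neg hs, ih]
      simp only [List.dropLast_concat, getLast!_concat_int, List.length_append, List.length_cons,
        List.length_nil]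
      have hk : t.length + (0 + 1) - (k + 1) = t.length - k := by omega
      rw [hk, List.drop_append_of_le_length (by omega), List.take_append_of_le_length (by omega)]
      simp

-- Reference: groups of (m+1) from the end, built front-to-back by peeling the last group.
def refGroups (m : Nat) (s : List Int) : List (List Int) :=
  if h : s = [] then []
  else refGroups m (s.take (s.length - (m + 1))) ++ [s.drop (s.length - (m + 1))]
termination_by s.length
decreasing_by
  have : 0 < s.length := List.length_pos_iff.mpr h
  simp [List.length_take]; omega

theorem refGroups_nil (m : Nat) : refGroups m [] = [] := by
  rw [refGroups]; simp

theorem refGroups_cons (m : Nat) (s : List Int) (h : s ≠ []) :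
    refGroups m s = refGroups m (s.take (s.length - (m + 1))) ++ [s.drop (s.length - (m + 1))] := by
  rw [refGroups]; simp [h]

theorem outer_spec (nn : Nat) (hnn : 1 ≤ nn) (fuel : Nat) (s : List Int) (out : List (List Int))
    (hf : s.length ≤ fuel) :
    rpartitionOuter nn fuel s out = refGroups (nn - 1) s ++ out.reverse := by
  induction fuel generalizing s out with
  | zero =>
    have : s = [] := List.length_eq_zero_iff.mp (by omega)
    subst this
    simp [rpartitionOuter, refGroups_nil]
  | succ fuel ih =>
    rcases eq_or_ne s [] with rfl | hs
    · simp [rpartitionOuter, refGroups_nil]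
    · have hlen : 0 < s.length := List.length_pos_iff.mpr hs
      rw [rpartitionOuter, if_neg hs]
      simp only [inner_spec]
      rw [ih _ _ (by simp [List.length_take]; omega)]
      rw [refGroups_cons _ _ hs]
      have hmn : nn - 1 + 1 = nn := by omega
      rw [hmn]
      simp

-- B, rewritten in Nat arithmetic
def altNat (nn : Nat) (s : List Int) : List (List Int) :=
  (if s.length % nn ≠ 0 then [s.take (s.length % nn)] else []) ++
    (List.range ((s.length - s.length % nn) / nn)).map
      (fun k => ((s.drop (s.length % nn + nn * k)).take nn))

theorem nat_div_round (nn d : Nat) (h1 : 1 ≤ nn) (hd : nn ∣ d) : (d + nn - 1) / nn = d / nn := by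
  obtain ⟨q, rfl⟩ := hd
  have h2 : nn * q + nn - 1 = nn * q + (nn - 1) := by omega
  rw [h2, Nat.mul_add_div (by omega), Nat.mul_div_cancel_left _ (by omega),
    Nat.div_eq_of_lt (by omega), Nat.add_zero]

theorem pyRange_step (r L nn : Nat) (h1 : 1 ≤ nn) (hr : r = L % nn) :
    PySem.List.pyRange (r : Int) (L : Int) (nn : Int) =
      (List.range ((L - r) / nn)).map (fun k => ((r + nn * k : Nat) : Int)) := by
  have hrL : r ≤ L := hr ▸ Nat.mod_le L nn
  have hdvd : nn ∣ (L - r) := hr ▸ Nat.dvd_sub_mod L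
  rw [PySem.List.pyRange_of_pos _ _ (by exact_mod_cast h1)]
  rcases eq_or_lt_of_le hrL with rfl | hlt
  · simp
  · rw [if_pos (by exact_mod_cast hlt)]
    have hcast : (L : Int) - r + nn - 1 = ((L - r + nn - 1 : Nat) : Int) := by omega
    rw [hcast]
    rw [show ((L - r + nn - 1 : Nat) : Int) / (nn : Int) = (((L - r + nn - 1) / nn : Nat) : Int) from (Int.natCast_div _ _).symm]
    rw [Int.toNat_natCast, nat_div_round nn (L - r) h1 hdvd]
    apply List.map_congr_left
    intro k _
    push_cast
    ring

theorem alt_eq_altNat (seq : List Int) (n : Int) (hn : 1 ≤ n) :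
    rpartition_alt seq n = altNat n.toNat seq := by
  obtain ⟨nn, rfl⟩ : ∃ nn : Nat, n = (nn : Int) := ⟨n.toNat, (Int.toNat_of_nonneg (by omega)).symm⟩
  have hnn : 1 ≤ nn := by exact_mod_cast hn
  unfold rpartition_alt altNat
  simp only [Int.toNat_natCast]
  rw [PySem.Int.mod_natCast seq.length nn, pyRange_step _ _ _ hnn rfl, List.map_map]
  congr 1
  · by_cases h : seq.length % nn = 0
    · simp [h]
    · rw [if_pos (by exact_mod_cast h), if_pos h, PySem.List.slice_to_natCast]
  · apply List.map_congr_left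
    intro k _
    exact PySem.List.slice_natCast_add seq _ nn

theorem altNat_eq_refGroups (nn : Nat) (hnn : 1 ≤ nn) (s : List Int) :
    altNat nn s = refGroups (nn - 1) s := by
  induction hL : s.length using Nat.strong_induction_on generalizing s with
  | _ L ih =>
  rcases eq_or_ne s [] with rfl | hs
  · simp [altNat, refGroups_nil]
  have hpos : 0 < L := hL ▸ List.length_pos_iff.mpr hs
  have hmn : nn - 1 + 1 = nn := by omega
  rw [refGroups_cons _ _ hs, hmn, hL]
  set r : Nat := L % nn with hr
  have hrlt : r < nn := Nat.mod_lt _ (by omega)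
  by_cases hcase : L ≤ nn
  · -- single group: take (L - nn) = [], drop (L - nn) = s
    have h0 : L - nn = 0 := by omega
    rw [h0]
    simp only [List.take_zero, List.drop_zero, refGroups_nil, List.nil_append]
    unfold altNat
    rw [hL, ← hr]
    rcases eq_or_lt_of_le hcase with heq | hlt
    · -- L = nn : r = 0, one full group
      have hr0 : r = 0 := by rw [hr, heq, Nat.mod_self]
      have hq : (L - r) / nn = 1 := by rw [hr0, Nat.sub_zero, heq, Nat.div_self (by omega)]
      rw [hq, hr0, if_neg (by simp), List.range_one, List.map_singleton]
      simp only [Nat.mul_zero, Nat.add_zero, List.drop_zero, List.nil_append]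
      rw [List.take_of_length_le (by omega)]
    · -- L < nn : r = L, only the partial leading group
      have hrL : r = L := by rw [hr, Nat.mod_eq_of_lt hlt]
      have hq : (L - r) / nn = 0 := by rw [hrL]; simp
      rw [hq, hrL, if_pos (by omega), List.range_zero, List.map_nil, List.append_nil,
        List.take_of_length_le (by omega)]
  · -- L > nn : peel the last (full) group
    rw [Nat.not_le] at hcase
    set L' : Nat := L - nn with hL'
    have hLsum : L = L' + nn := by omega
    have hrL' : L' % nn = r := by rw [hr, hLsum, Nat.add_mod_right]
    have hrle : r ≤ L' := by
      rcases Nat.lt_or_ge L' nn with h | h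
      · have := Nat.mod_eq_of_lt h; omega
      · omega
    have hdvd : nn ∣ (L - r) := Nat.dvd_sub_mod L
    obtain ⟨q, hq⟩ := hdvd
    have hq1 : 1 ≤ q := by rcases Nat.eq_zero_or_pos q with rfl | h <;> omega
    have htk : (s.take L').length = L' := by rw [List.length_take, hL]; omega
    rw [← ih L' (by omega) (s.take L') htk]
    -- now show altNat nn s = altNat nn (s.take L') ++ [s.drop L']
    unfold altNat
    rw [htk, hL, ← hr, hrL', hq]
    have e3 : nn * (q - 1) = nn * q - nn * 1 := Nat.mul_sub nn q 1
    have hq' : (L' - r) / nn = q - 1 := by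
      rw [show L' - r = nn * (q - 1) by omega, Nat.mul_div_cancel_left _ (by omega)]
    rw [hq', Nat.mul_div_cancel_left _ (by omega)]
    rw [show q = (q - 1) + 1 by omega, List.range_succ, List.map_append, List.map_singleton]
    rw [List.append_assoc]
    congr 1
    · -- heads agree
      by_cases h0 : r = 0
      · simp [h0]
      · rw [if_pos h0, if_pos h0, List.take_take, min_eq_left (by omega)]
    congr 1
    · -- full groups over the prefix agree
      apply List.map_congr_left
      intro k hk
      rw [List.mem_range] at hk
      have e1 : nn * (k + 1) = nn * k + nn := by ring
      have e2 : nn * (k + 1) ≤ nn * (q - 1) := Nat.mul_le_mul_left _ (by omega)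
      rw [List.drop_take, List.take_take, min_eq_left (by omega)]
    · -- the peeled last group
      have hlast : r + nn * (q - 1) = L' := by omega
      rw [hlast, List.take_of_length_le (by rw [List.length_drop, hL]; omega)]

-- ===== VERDICT (by name: the statement is the Claim_ definition above) =====
theorem rpartition_spec : Claim_equal_rpartition := by
  intro seq n _ hn
  unfold Pre_rpartition at hn
  have hnn : 1 ≤ n.toNat := by omega
  unfold Spec_rpartition rpartition
  rw [outer_spec n.toNat hnn _ _ _ (by omega), alt_eq_altNat seq n hn,
    altNat_eq_refGroups n.toNat hnn seq]
  simp
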